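-- pv_equiv track=rewrite | github.com/XinnuoXu/AggGen | data_webnlg/seq_struct.py | add_seg
-- ===== SOURCE A (Python) =====
-- def add_seg(res):
--     for_tag = ""
--     new_res = []
--     for item in res:
--         flist = item.split('|')
--         tag = '|'.join(flist[1:])
--         if for_tag != "" and for_tag != tag:
--             new_res.append("[END]|" + for_tag)
--         for_tag = tag
--         new_res.append(item)
--     new_res.append("[END]|" + for_tag)
--     return new_res
-- ===== SOURCE B (Python) =====
-- def add_seg(res):
--     if not res:
--         return ["[END]|"]
--     tags = ['|'.join(item.split('|')[1:]) for item in res]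
--     nxt = tags[1:] + [None]
--     return [piece
--             for item, t, n in zip(res, tags, nxt)
--             for piece in ([item, "[END]|" + t] if n is None or (t != "" and n != t) else [item])]
-- ===== Notes on version B (the rewrite author's own statement) =====
-- stated objective: alternative
-- what changed: B precomputes the tag list, zips each item with its own tag and the next item's tag (staged passes), and emits per item a stateless [item]+optional-marker chunk via a flat comprehension, attaching the end marker after the last item of each nonempty-tag run and after the final item, instead of A's stateful scan that remembers the previous tag and inserts the marker before the first item of the next run.
import Mathlib
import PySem

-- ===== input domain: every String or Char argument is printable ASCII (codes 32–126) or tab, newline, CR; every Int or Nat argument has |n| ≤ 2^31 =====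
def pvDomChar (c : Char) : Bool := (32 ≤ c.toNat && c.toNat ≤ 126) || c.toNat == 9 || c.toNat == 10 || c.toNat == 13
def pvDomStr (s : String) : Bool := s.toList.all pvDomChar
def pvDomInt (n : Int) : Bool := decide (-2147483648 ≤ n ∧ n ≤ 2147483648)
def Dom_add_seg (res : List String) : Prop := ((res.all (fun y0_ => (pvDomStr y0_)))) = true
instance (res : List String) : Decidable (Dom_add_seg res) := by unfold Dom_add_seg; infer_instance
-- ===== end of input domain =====

-- B replaces A's stateful previous-tag scan by a tag list zipped with its own shift and a
-- stateless per-item flatMap that attaches each end marker AFTER its run; objective: alternative.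

-- ===== PORT A =====
-- tag of an item: '|'.join(item.split('|')[1:]); split? with non-empty sep is always `some`
def pvTag (item : String) : String :=
  PySem.Str.join "|" (((PySem.Str.split? item "|").getD []).drop 1)

-- A's loop body: state = (new_res, for_tag)
def pvStepA (st : List String × String) (item : String) : List String × String :=
  let tag := pvTag item
  let nr := if st.2 ≠ "" ∧ st.2 ≠ tag then st.1 ++ ["[END]|" ++ st.2] else st.1
  (nr ++ [item], tag)

def add_seg (res : List String) : List String :=
  let st := res.foldl pvStepA ([], "")
  st.1 ++ ["[END]|" ++ st.2]

-- ===== PORT B =====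
-- one comprehension chunk per (item, own-tag, next-tag) triple
def pvChunk (p : (String × String) × Option String) : List String :=
  if p.2 = none ∨ (p.1.2 ≠ "" ∧ p.2 ≠ some p.1.2) then [p.1.1, "[END]|" ++ p.1.2]
  else [p.1.1]

def pvBflat (l : List String) : List String :=
  ((l.zip (l.map pvTag)).zip (((l.map pvTag).drop 1).map some ++ [none])).flatMap pvChunk

def add_seg_alt (res : List String) : List String :=
  if res = [] then ["[END]|"] else pvBflat res

-- ===== PRECONDITION & SPEC =====
def Spec_add_seg (res : List String) (out : List String) : Prop := out = add_seg_alt res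
instance (res : List String) (out : List String) : Decidable (Spec_add_seg res out) := by unfold Spec_add_seg; infer_instance

-- ===== CLAIM (what is proved, stated in full; the proofs are below) =====
def Claim_equal_add_seg : Prop := ∀ (res : List String), Dom_add_seg res → Spec_add_seg res (add_seg res)

-- ===== LEMMAS AND PROOFS =====

-- common reference shape: output of the remaining list given the previous tag k
def pvG (k : String) : List String → List String
  | [] => ["[END]|" ++ k]
  | x :: xs => (if k ≠ "" ∧ k ≠ pvTag x then ["[END]|" ++ k] else []) ++ x :: pvG (pvTag x) xs

theorem pvA_eq_pvG (l : List String) (acc : List String) (k : String) :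
    (l.foldl pvStepA (acc, k)).1 ++ ["[END]|" ++ (l.foldl pvStepA (acc, k)).2]
      = acc ++ pvG k l := by
  induction l generalizing acc k with
  | nil => simp [pvG]
  | cons x xs ih =>
    simp only [List.foldl_cons, pvG]
    by_cases h : k ≠ "" ∧ k ≠ pvTag x
    · have hstep : pvStepA (acc, k) x = (acc ++ ["[END]|" ++ k] ++ [x], pvTag x) := by
        simp [pvStepA, h]
      rw [hstep, ih]
      simp [h]
    · have hstep : pvStepA (acc, k) x = (acc ++ [x], pvTag x) := by
        simp only [pvStepA, if_neg h]
      rw [hstep, ih]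
      simp [h]

theorem pvBflat_cons_eq_pvG (x : String) (xs : List String) :
    pvBflat (x :: xs) = x :: pvG (pvTag x) xs := by
  induction xs generalizing x with
  | nil => simp [pvBflat, pvChunk, pvG]
  | cons y ys ih =>
    have hx : pvBflat (x :: y :: ys)
        = pvChunk ((x, pvTag x), some (pvTag y)) ++ pvBflat (y :: ys) := by
      simp [pvBflat, List.map_cons, List.drop, List.zip]
    rw [hx, ih y]
    by_cases h : pvTag x ≠ "" ∧ pvTag x ≠ pvTag y
    · have hch : pvChunk ((x, pvTag x), some (pvTag y)) = [x, "[END]|" ++ pvTag x] := by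
        simp only [pvChunk]
        rw [if_pos]; right; exact ⟨h.1, by simpa using fun hh => h.2 hh.symm⟩
      rw [hch]; simp [pvG, h]
    · have hch : pvChunk ((x, pvTag x), some (pvTag y)) = [x] := by
        simp only [pvChunk]
        rw [if_neg]
        push Not
        refine ⟨by simp, fun h1 => ?_⟩
        by_cases h2 : pvTag x = pvTag y
        · simp [h2]
        · exact absurd ⟨h1, h2⟩ h
      rw [hch]; simp [pvG, h]

-- ===== VERDICT (by name: the statement is the Claim_ definition above) =====
theorem add_seg_spec : Claim_equal_add_seg := by
  intro res _
  unfold Spec_add_seg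
  cases res with
  | nil => simp [add_seg, add_seg_alt]
  | cons x xs =>
    have hA := pvA_eq_pvG (x :: xs) [] ""
    simp only [List.nil_append] at hA
    rw [add_seg, add_seg_alt, if_neg (by simp), pvBflat_cons_eq_pvG]
    rw [hA]
    simp [pvG]
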